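-- pv_equiv track=rewrite | github.com/shigetosidumeda-cyber/autonomath-mcp | scripts/cron/precompute_data_quality.py | _freshness_bucket_for
-- ===== SOURCE A (Python) =====
-- _FRESHNESS_BUCKETS: list[tuple[str, int | None]] = [
--     ("<=30d", 30),
--     ("31-180d", 180),
--     ("181-365d", 365),
--     (">365d", None),
-- ]
--
-- def _freshness_bucket_for(days: int | None) -> str:
--     if days is None or days < 0:
--         return "unknown"
--     for label, upper in _FRESHNESS_BUCKETS:
--         if upper is None:
--             return label
--         if days <= upper:
--             return label
--     return ">365d"
-- ===== SOURCE B (Python) =====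
-- import bisect
--
-- _THRESHOLDS = [30, 180, 365]
-- _LABELS = ["<=30d", "31-180d", "181-365d", ">365d"]
--
-- def _freshness_bucket_for(days):
--     if days is None or days < 0:
--         return "unknown"
--     return _LABELS[bisect.bisect_left(_THRESHOLDS, days)]
-- ===== Notes on version B (the rewrite author's own statement) =====
-- stated objective: idiomatic
-- what changed: Replaces the sequential scan over a (label, upper) tuple table with a bisect_left binary search over a sorted threshold list indexing into a parallel label list.
import Mathlib
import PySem

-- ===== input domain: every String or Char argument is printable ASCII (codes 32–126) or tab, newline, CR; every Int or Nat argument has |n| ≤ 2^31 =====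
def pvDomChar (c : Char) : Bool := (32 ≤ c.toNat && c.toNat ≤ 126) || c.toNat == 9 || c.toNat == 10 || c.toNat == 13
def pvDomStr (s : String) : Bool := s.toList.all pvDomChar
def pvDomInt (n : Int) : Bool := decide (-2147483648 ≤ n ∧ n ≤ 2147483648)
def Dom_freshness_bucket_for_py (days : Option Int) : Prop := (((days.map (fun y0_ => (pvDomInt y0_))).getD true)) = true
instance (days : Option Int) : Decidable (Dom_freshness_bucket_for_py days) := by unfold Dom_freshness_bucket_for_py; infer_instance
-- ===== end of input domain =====

-- B replaces A's sequential scan of a (label, upper) tuple table by a bisect_left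
-- binary search over a sorted threshold list indexing a parallel label list (idiomatic).

-- ===== PORT A =====
def pvFreshnessBuckets : List (String × Option Int) :=
  [("<=30d", some 30), ("31-180d", some 180), ("181-365d", some 365), (">365d", none)]

-- the for-loop with early returns, as structural recursion over the bucket table
def pvScanBuckets (d : Int) : List (String × Option Int) → String
  | [] => ">365d"
  | (label, upper) :: rest =>
    match upper with
    | none => label
    | some u => if d ≤ u then label else pvScanBuckets d rest

def freshness_bucket_for_py (days : Option Int) : String :=
  match days with
  | none => "unknown"
  | some d => if d < 0 then "unknown" else pvScanBuckets d pvFreshnessBuckets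

-- ===== PORT B =====
def pvThresholds : List Int := [30, 180, 365]
def pvLabels : List String := ["<=30d", "31-180d", "181-365d", ">365d"]

-- bisect.bisect_left on a sorted list = number of elements strictly below the key
def pvBisectLeft (xs : List Int) (x : Int) : Nat := xs.countP (fun t => decide (t < x))

def freshness_bucket_for_py_alt (days : Option Int) : String :=
  match days with
  | none => "unknown"
  | some d => if d < 0 then "unknown" else pvLabels.getD (pvBisectLeft pvThresholds d) ""

-- ===== PRECONDITION & SPEC =====
def Spec_freshness_bucket_for_py (days : Option Int) (out : String) : Prop := out = freshness_bucket_for_py_alt days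
instance (days : Option Int) (out : String) : Decidable (Spec_freshness_bucket_for_py days out) := by unfold Spec_freshness_bucket_for_py; infer_instance

-- ===== CLAIM (what is proved, stated in full; the proofs are below) =====
def Claim_equal_freshness_bucket_for_py : Prop := ∀ (days : Option Int), Dom_freshness_bucket_for_py days → Spec_freshness_bucket_for_py days (freshness_bucket_for_py days)

-- ===== LEMMAS AND PROOFS =====

-- ===== VERDICT (by name: the statement is the Claim_ definition above) =====
theorem freshness_bucket_for_py_spec : Claim_equal_freshness_bucket_for_py := by
  intro days _
  unfold Spec_freshness_bucket_for_py freshness_bucket_for_py freshness_bucket_for_py_alt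
  cases days with
  | none => rfl
  | some d =>
    simp only [pvScanBuckets, pvFreshnessBuckets, pvBisectLeft, pvThresholds, pvLabels,
      List.countP_cons, List.countP_nil]
    by_cases h0 : d < 0
    · simp [h0]
    · by_cases h1 : d ≤ 30
      · simp [h0, h1, show ¬(30 < d) by omega, show ¬(180 < d) by omega,
          show ¬(365 < d) by omega]
      · by_cases h2 : d ≤ 180
        · simp [h0, h1, show (30 < d) by omega, show ¬(180 < d) by omega,
            show ¬(365 < d) by omega]
        · by_cases h3 : d ≤ 365
          · simp [h0, h1, h2, show (30 < d) by omega, show (180 < d) by omega,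
              show ¬(365 < d) by omega]
          · simp [h0, h1, h2, h3, show (30 < d) by omega, show (180 < d) by omega,
              show (365 < d) by omega]
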